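-- pv_equiv track=rewrite | github.com/AdamZhouSE/pythonHomework | Code/CodeRecords/2918/60643/296749.py | solution
-- ===== SOURCE A (Python) =====
-- def solution(box):
--     box=sorted(box)
--     visited=[False]*len(box)
--     total=len(box)
--     ans=0
--     while total>0:
--         tmp=0
--         for i in range(len(box)):
--             if box[i]>=tmp and not visited[i]:
--                 visited[i]=True
--                 tmp+=1#下一层需要的最小抗压值
--                 total-=1# box用了一个
--         ans+=1#一个堆建立
--     return ans
-- ===== SOURCE B (Python) =====
-- def solution(box):
--     ans = 0
--     for i, v in enumerate(sorted(box)):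
--         q = -(-(i + 1) // (v + 1))
--         if q > ans:
--             ans = q
--     return ans
-- ===== Notes on version B (the rewrite author's own statement) =====
-- stated objective: alternative
-- what changed: B replaces A's repeated greedy marking passes over a visited array (one full scan per stack built) with a single pass over the sorted list using the closed form ans = max_i ceil((i+1)/(v_i+1)); intended as faster (O(n log n) vs A's O(n^2) worst case) but a timing run could not confirm a ratio, so no speed is claimed; Pre_ excludes lists with a negative element, on which A's while loop never terminates.
import Mathlib
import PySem

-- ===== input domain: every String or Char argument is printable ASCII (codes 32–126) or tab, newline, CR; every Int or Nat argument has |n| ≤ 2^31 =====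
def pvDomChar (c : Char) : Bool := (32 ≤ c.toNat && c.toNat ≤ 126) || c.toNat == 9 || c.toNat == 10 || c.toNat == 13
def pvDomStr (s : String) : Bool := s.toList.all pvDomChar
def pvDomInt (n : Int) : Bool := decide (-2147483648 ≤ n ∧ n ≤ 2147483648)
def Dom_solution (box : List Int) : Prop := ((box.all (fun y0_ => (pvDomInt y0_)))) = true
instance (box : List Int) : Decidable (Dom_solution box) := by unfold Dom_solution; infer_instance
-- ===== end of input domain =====

-- B replaces A's repeated greedy marking passes (one scan per stack) with a single pass over the
-- sorted list computing ans = max_i ceil((i+1)/(v_i+1)) — a different (closed-form) algorithm.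

-- ===== PORT A =====
-- inner for-loop of A: scans the (value, visited) array left to right with the running `tmp`;
-- returns the updated array and the final `tmp` (= number of boxes taken this pass).
def innerA : List (Int × Bool) → Int → (List (Int × Bool) × Int)
  | [], tmp => ([], tmp)
  | (x, vis) :: rest, tmp =>
    if x ≥ tmp ∧ vis = false then
      let r := innerA rest (tmp + 1)
      ((x, true) :: r.1, r.2)
    else
      let r := innerA rest tmp
      ((x, vis) :: r.1, r.2)

-- A's while loop; fuel = len(box)+1 suffices on Pre_ (each pass takes ≥ 1 box); on inputs with a
-- negative element Python A diverges (excluded by Pre_).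
def whileA : Nat → List (Int × Bool) → Int → Int → Int
  | 0, _, _, ans => ans
  | fuel + 1, st, total, ans =>
    if total > 0 then
      let p := innerA st 0
      whileA fuel p.1 (total - p.2) (ans + 1)
    else ans

def solution (box : List Int) : Int :=
  let s := PySem.List.sorted box (fun x => x) false
  whileA (s.length + 1) (s.map (fun x => (x, false))) (s.length : Int) 0

-- ===== PORT B =====
def solution_alt (box : List Int) : Int :=
  (PySem.List.enumerate (PySem.List.sorted box (fun x => x) false) 0).foldl
    (fun ans iv =>
      let q := -(PySem.Int.floordiv (-(iv.1 + 1)) (iv.2 + 1))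
      if q > ans then q else ans) 0

-- ===== PRECONDITION & SPEC =====
-- Pre_ excludes lists containing a negative element: there Python A's while loop never terminates
-- (a box with negative strength is never picked, total never reaches 0), so A never returns.
def Pre_solution (box : List Int) : Prop := ∀ x ∈ box, 0 ≤ x
instance (box : List Int) : Decidable (Pre_solution box) := by unfold Pre_solution; infer_instance

def pvWitness_solution : List Int := [0, 1, 2]

def Spec_solution (box : List Int) (out : Int) : Prop := out = solution_alt box
instance (box : List Int) (out : Int) : Decidable (Spec_solution box out) := by unfold Spec_solution; infer_instance

-- ===== CLAIM (what is proved, stated in full; the proofs are below) =====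
def Claim_equal_solution : Prop := ∀ (box : List Int), Dom_solution box → Pre_solution box → Spec_solution box (solution box)

-- ===== LEMMAS AND PROOFS =====

-- remaining (unvisited) values of a state
def remU (st : List (Int × Bool)) : List Int := (st.filter (fun p => !p.2)).map Prod.fst

-- abstract single pass on the remaining (sorted) values: (remaining-after, final tmp)
def passP : List Int → Int → (List Int × Int)
  | [], t => ([], t)
  | x :: xs, t =>
    if x ≥ t then passP xs (t + 1)
    else
      let r := passP xs t
      (x :: r.1, r.2)

-- count of elements ≤ v, as an Int
def cntLe (v : Int) (xs : List Int) : Int := ((xs.filter (fun x => decide (x ≤ v))).length : Int)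

-- ceiling division a/b (b > 0) as B computes it
def cq (a b : Int) : Int := -(PySem.Int.floordiv (-a) b)

-- running maximum fold, the shape of B's loop
def fmax {α : Type} (f : α → Int) (l : List α) (a : Int) : Int :=
  l.foldl (fun ans x => if f x > ans then f x else ans) a

def gval (xs : List Int) : Int := fmax (fun v => cq (cntLe v xs) (v + 1)) xs 0

-- ---- fmax lemmas ----
theorem fmax_init_le {α : Type} (f : α → Int) (l : List α) (a : Int) : a ≤ fmax f l a := by
  induction l generalizing a with
  | nil => simp [fmax]
  | cons x l ih =>
    simp only [fmax, List.foldl] at *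
    refine le_trans ?_ (ih _)
    split <;> omega

theorem fmax_le {α : Type} (f : α → Int) (l : List α) (a R : Int)
    (h : ∀ x ∈ l, f x ≤ R) (ha : a ≤ R) : fmax f l a ≤ R := by
  induction l generalizing a with
  | nil => simpa [fmax]
  | cons x l ih =>
    simp only [fmax, List.foldl] at *
    refine ih _ (fun y hy => h y (by simp [hy])) ?_
    have := h x (by simp)
    split <;> omega

theorem le_fmax_of_mem {α : Type} (f : α → Int) (l : List α) (a : Int) {x : α}
    (hx : x ∈ l) : f x ≤ fmax f l a := by
  induction l generalizing a with
  | nil => cases hx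
  | cons y l ih =>
    rcases List.mem_cons.mp hx with h | h
    · subst h
      simp only [fmax, List.foldl]
      refine le_trans ?_ (fmax_init_le f l _)
      split <;> omega
    · exact ih _ h

theorem fmax_eq_init_or_mem {α : Type} (f : α → Int) (l : List α) (a : Int) :
    fmax f l a = a ∨ ∃ x ∈ l, fmax f l a = f x := by
  induction l generalizing a with
  | nil => left; rfl
  | cons x l ih =>
    simp only [fmax, List.foldl]
    rcases ih (if f x > a then f x else a) with h | ⟨y, hy, h⟩
    · by_cases hq : f x > a
      · right; exact ⟨x, by simp, by simpa [hq] using h⟩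
      · left; simpa [hq] using h
    · right; exact ⟨y, by simp [hy], h⟩

-- ---- cq lemmas ----
theorem cq_bounds (a b : Int) (hb : 0 < b) : (cq a b - 1) * b < a ∧ a ≤ cq a b * b :=
  (PySem.Int.neg_floordiv_neg_eq_iff_of_pos hb).mp rfl

theorem cq_le_iff (a b R : Int) (hb : 0 < b) : cq a b ≤ R ↔ a ≤ R * b := by
  obtain ⟨h1, h2⟩ := cq_bounds a b hb
  constructor
  · intro h
    calc a ≤ cq a b * b := h2
      _ ≤ R * b := by nlinarith
  · intro h
    nlinarith

theorem cq_nonneg (a b : Int) (ha : 0 ≤ a) (hb : 0 < b) : 0 ≤ cq a b := by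
  obtain ⟨h1, h2⟩ := cq_bounds a b hb
  nlinarith

theorem cq_one_le (a b : Int) (ha : 1 ≤ a) (hb : 0 < b) : 1 ≤ cq a b := by
  obtain ⟨h1, h2⟩ := cq_bounds a b hb
  nlinarith

theorem cq_mono_a (a a' b : Int) (h : a ≤ a') (hb : 0 < b) : cq a b ≤ cq a' b := by
  rw [cq_le_iff _ _ _ hb]
  exact le_trans h (cq_bounds a' b hb).2

theorem cq_anti_b (a b b' : Int) (ha : 0 ≤ a) (hb : 0 < b) (hbb : b ≤ b') :
    cq a b' ≤ cq a b := by
  rw [cq_le_iff _ _ _ (lt_of_lt_of_le hb hbb)]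
  have h2 := (cq_bounds a b hb).2
  have h0 := cq_nonneg a b ha hb
  nlinarith

theorem cq_sub (a b : Int) (hb : 0 < b) : cq (a - b) b = cq a b - 1 := by
  obtain ⟨h1, h2⟩ := cq_bounds a b hb
  rw [show cq (a - b) b = -(PySem.Int.floordiv (-(a-b)) b) from rfl,
    PySem.Int.neg_floordiv_neg_eq_iff_of_pos hb]
  constructor <;> nlinarith

-- ---- cntLe lemmas ----
theorem cntLe_nil (v : Int) : cntLe v [] = 0 := rfl

theorem cntLe_cons (v x : Int) (xs : List Int) :
    cntLe v (x :: xs) = (if x ≤ v then 1 else 0) + cntLe v xs := by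
  simp only [cntLe, List.filter]
  by_cases h : x ≤ v <;> simp [h] <;> push_cast <;> ring

theorem cntLe_nonneg (v : Int) (xs : List Int) : 0 ≤ cntLe v xs := by
  simp [cntLe]

theorem cntLe_sublist_le {xs ys : List Int} (v : Int) (h : List.Sublist xs ys) :
    cntLe v xs ≤ cntLe v ys := by
  simp only [cntLe]
  exact_mod_cast (h.filter _).length_le

theorem cntLe_pos_of_mem {v : Int} {xs : List Int} (h : v ∈ xs) : 1 ≤ cntLe v xs := by
  have : v ∈ xs.filter (fun x => decide (x ≤ v)) := List.mem_filter.mpr ⟨h, by simp⟩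
  have := List.length_pos_of_mem this
  simp only [cntLe]
  omega

-- ---- passP lemmas ----
theorem passP_fst_sublist (xs : List Int) (t : Int) : List.Sublist (passP xs t).1 xs := by
  induction xs generalizing t with
  | nil => simp [passP]
  | cons x xs ih =>
    simp only [passP]
    split
    · exact (ih (t + 1)).cons x
    · exact (ih t).cons₂ x

theorem passP_snd (xs : List Int) (t : Int) :
    (passP xs t).2 + ((passP xs t).1.length : Int) = t + (xs.length : Int) := by
  induction xs generalizing t with
  | nil => simp [passP]
  | cons x xs ih =>
    simp only [passP]
    split
    · have := ih (t + 1); simp only [List.length_cons]; push_cast at this ⊢; omega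
    · have := ih t; simp only [List.length_cons]; push_cast at this ⊢; omega

-- each pass removes at most max(v+1-t, 0) elements of value ≤ v
theorem passP_upper (v : Int) (xs : List Int) (t : Int) :
    cntLe v xs - cntLe v (passP xs t).1 ≤ max (v + 1 - t) 0 := by
  induction xs generalizing t with
  | nil => simp [passP, cntLe_nil]
  | cons x xs ih =>
    simp only [passP]
    split
    · rename_i hx
      have := ih (t + 1)
      rw [cntLe_cons]
      by_cases hxv : x ≤ v
      · have ht : t ≤ v := le_trans hx hxv
        simp only [hxv, if_pos]
        omega
      · simp only [hxv, if_neg, not_false_iff]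
        omega
    · have := ih t
      rw [cntLe_cons, cntLe_cons]
      split <;> omega

-- greedy progress: if y survives a pass of a sorted list, at least y+1-t elements ≤ y were taken
theorem passP_lower {xs : List Int} (hs : xs.Pairwise (· ≤ ·)) (t : Int) {y : Int}
    (hy : y ∈ (passP xs t).1) :
    y + 1 - t ≤ cntLe y xs - cntLe y (passP xs t).1 := by
  induction xs generalizing t with
  | nil => simp [passP] at hy
  | cons x xs ih =>
    have hhd : ∀ z ∈ xs, x ≤ z := fun z hz => List.rel_of_pairwise_cons hs hz
    have hpw : xs.Pairwise (· ≤ ·) := hs.of_cons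
    simp only [passP] at hy ⊢
    split at hy <;> rename_i hx
    · -- x picked: remaining = (passP xs (t+1)).1, and x ≤ y since y is in the tail
      have hyxs : y ∈ xs := (passP_fst_sublist xs (t + 1)).mem hy
      have hxy : x ≤ y := hhd y hyxs
      have := ih hpw (t + 1) hy
      simp only [if_pos hx]
      rw [cntLe_cons]
      simp only [hxy, if_pos]
      omega
    · -- x skipped (x < t): remaining = x :: (passP xs t).1
      simp only [if_neg hx]
      rw [cntLe_cons, cntLe_cons]
      rcases List.mem_cons.mp hy with h | h
      · -- y = x, and x < t, so the bound is ≤ 0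
        subst h
        have hle := cntLe_sublist_le y (passP_fst_sublist xs t)
        have : ¬ y ≥ t := hx
        split <;> omega
      · have := ih hpw t h
        split <;> omega

-- ---- gval lemmas ----
theorem gval_nonneg (xs : List Int) : 0 ≤ gval xs := fmax_init_le _ _ _

theorem gval_one_le {xs : List Int} (hn : ∀ x ∈ xs, 0 ≤ x) (hne : xs ≠ []) : 1 ≤ gval xs := by
  obtain ⟨x, xs', rfl⟩ := List.exists_cons_of_ne_nil hne
  have hx : x ∈ x :: xs' := by simp
  refine le_trans ?_ (le_fmax_of_mem _ _ _ hx)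
  exact cq_one_le _ _ (cntLe_pos_of_mem hx) (by have := hn x hx; omega)

theorem cntLe_le_of_gval {xs : List Int} {v : Int} (hv : v ∈ xs) (h0 : 0 ≤ v) :
    cntLe v xs ≤ gval xs * (v + 1) := by
  have := le_fmax_of_mem (fun v => cq (cntLe v xs) (v + 1)) xs 0 hv
  exact (cq_le_iff _ _ _ (by omega)).mp this

theorem exists_max_of_ne_nil (l : List Int) (h : l ≠ []) : ∃ w ∈ l, ∀ x ∈ l, x ≤ w := by
  induction l with
  | nil => exact absurd rfl h
  | cons a l ih =>
    cases l with
    | nil => exact ⟨a, by simp, by simp⟩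
    | cons b l' =>
      obtain ⟨w, hw, hmax⟩ := ih (by simp)
      by_cases haw : a ≤ w
      · exact ⟨w, by simp [hw], by
          intro x hx
          rcases List.mem_cons.mp hx with rfl | hx
          · exact haw
          · exact hmax x hx⟩
      · exact ⟨a, by simp, by
          intro x hx
          rcases List.mem_cons.mp hx with rfl | hx
          · omega
          · exact le_trans (hmax x hx) (by omega)⟩

-- the crux: one greedy pass on a sorted nonnegative nonempty list decreases gval by exactly 1
theorem gval_pass {xs : List Int} (hs : xs.Pairwise (· ≤ ·)) (hn : ∀ x ∈ xs, 0 ≤ x)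
    (hne : xs ≠ []) : gval (passP xs 0).1 = gval xs - 1 := by
  have hG1 : 1 ≤ gval xs := gval_one_le hn hne
  set r := (passP xs 0).1 with hr
  have hsub : List.Sublist r xs := passP_fst_sublist xs 0
  apply le_antisymm
  · -- gval r ≤ gval xs - 1
    refine fmax_le _ _ _ _ ?_ (by omega)
    intro v hvr
    have hvxs : v ∈ xs := hsub.mem hvr
    have h0v : 0 ≤ v := hn v hvxs
    have hlow := passP_lower hs 0 (hr ▸ hvr)
    rw [← hr] at hlow
    have hbound := cntLe_le_of_gval hvxs h0v
    rw [cq_le_iff _ _ _ (by omega)]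
    have : cntLe v r ≤ cntLe v xs - (v + 1) := by omega
    nlinarith
  · -- gval xs - 1 ≤ gval r
    rcases fmax_eq_init_or_mem (fun v => cq (cntLe v xs) (v + 1)) xs 0 with h | ⟨v, hv, h⟩
    · have hnn := gval_nonneg r
      unfold gval at hnn ⊢; rw [h]; omega
    · have h0v : 0 ≤ v := hn v hv
      have hup := passP_upper v xs 0
      have hmax : max (v + 1 - 0) 0 = v + 1 := by omega
      rw [hmax] at hup
      rw [← hr] at hup
      by_cases hz : cntLe v r ≤ 0
      · -- nothing ≤ v remains: cntLe v xs ≤ v+1, so the gval xs term was ≤ 1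
        have hc : cntLe v xs ≤ v + 1 := by
          have := cntLe_nonneg v r; omega
        have : cq (cntLe v xs) (v + 1) ≤ 1 := by
          rw [cq_le_iff _ _ _ (by omega)]; omega
        have hnn := gval_nonneg r
        unfold gval at hnn ⊢; rw [h]; omega
      · -- some element ≤ v remains; take the largest such w
        push Not at hz
        have hF : r.filter (fun x => decide (x ≤ v)) ≠ [] := by
          intro hFnil
          simp only [cntLe, hFnil, List.length_nil] at hz
          omega
        obtain ⟨w, hwF, hwmax⟩ := exists_max_of_ne_nil _ hF
        have hwr : w ∈ r := (List.mem_filter.mp hwF).1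
        have hwv : w ≤ v := by have := (List.mem_filter.mp hwF).2; simpa using this
        have h0w : 0 ≤ w := hn w (hsub.mem hwr)
        have hcnt : cntLe w r = cntLe v r := by
          simp only [cntLe]
          congr 1
          refine congrArg _ (List.filter_congr ?_)
          intro x hx
          by_cases hxw : x ≤ w
          · simp [hxw, le_trans hxw hwv]
          · have hxv : ¬ x ≤ v := by
              intro hxv
              exact hxw (hwmax x (List.mem_filter.mpr ⟨hx, by simpa using hxv⟩))
            simp [hxw, hxv]
        have step1 : cq (cntLe v xs) (v + 1) - 1 = cq (cntLe v xs - (v + 1)) (v + 1) :=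
          (cq_sub _ _ (by omega)).symm
        have step2 : cq (cntLe v xs - (v + 1)) (v + 1) ≤ cq (cntLe v r) (v + 1) :=
          cq_mono_a _ _ _ (by omega) (by omega)
        have step3 : cq (cntLe v r) (v + 1) ≤ cq (cntLe v r) (w + 1) :=
          cq_anti_b _ _ _ (by have := cntLe_nonneg v r; omega) (by omega) (by omega)
        have step4 : cq (cntLe w r) (w + 1) ≤ gval r :=
          le_fmax_of_mem (fun u => cq (cntLe u r) (u + 1)) r 0 hwr
        rw [hcnt] at step4
        unfold gval at step4 ⊢; rw [h]; omega


-- ---- simulation bridge: A's marking pass = passP on the unvisited values ----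
theorem remU_innerA (st : List (Int × Bool)) (tmp : Int) :
    remU (innerA st tmp).1 = (passP (remU st) tmp).1 ∧
    (innerA st tmp).2 = (passP (remU st) tmp).2 := by
  induction st generalizing tmp with
  | nil => simp [innerA, remU, passP]
  | cons p st ih =>
    obtain ⟨x, vis⟩ := p
    cases vis with
    | true =>
      have he : innerA ((x, true) :: st) tmp
          = ((x, true) :: (innerA st tmp).1, (innerA st tmp).2) := by
        simp [innerA]
      have hrem : remU ((x, true) :: st) = remU st := by simp [remU]
      obtain ⟨h1, h2⟩ := ih tmp
      rw [he, hrem]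
      exact ⟨by simpa [remU] using h1, h2⟩
    | false =>
      have hrem : remU ((x, false) :: st) = x :: remU st := by simp [remU]
      by_cases hx : x ≥ tmp
      · have he : innerA ((x, false) :: st) tmp
            = ((x, true) :: (innerA st (tmp + 1)).1, (innerA st (tmp + 1)).2) := by
          simp [innerA, hx]
        have hp : passP (x :: remU st) tmp = passP (remU st) (tmp + 1) := by
          simp [passP, hx]
        obtain ⟨h1, h2⟩ := ih (tmp + 1)
        rw [he, hrem, hp]
        exact ⟨by simpa [remU] using h1, h2⟩
      · have he : innerA ((x, false) :: st) tmp
            = ((x, false) :: (innerA st tmp).1, (innerA st tmp).2) := by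
          simp [innerA, hx]
        have hp : passP (x :: remU st) tmp
            = (x :: (passP (remU st) tmp).1, (passP (remU st) tmp).2) := by
          simp [passP, hx]
        obtain ⟨h1, h2⟩ := ih tmp
        rw [he, hrem, hp]
        exact ⟨by simpa [remU] using h1, h2⟩

theorem remU_map_false (s : List Int) : remU (s.map (fun x => (x, false))) = s := by
  induction s with
  | nil => rfl
  | cons x s ih => simp [remU] at *; exact ih

-- A's while loop computes gval of the remaining values
theorem whileA_eq (fuel : Nat) :
    ∀ (st : List (Int × Bool)) (ans : Int),
      (remU st).Pairwise (· ≤ ·) → (∀ x ∈ remU st, 0 ≤ x) →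
      (remU st).length ≤ fuel →
      whileA fuel st ((remU st).length : Int) ans = ans + gval (remU st) := by
  induction fuel with
  | zero =>
    intro st ans _ _ hlen
    have : remU st = [] := List.eq_nil_of_length_eq_zero (by omega)
    rw [this]
    simp [whileA, gval, fmax]
  | succ fuel ih =>
    intro st ans hpw hn hlen
    by_cases hne : remU st = []
    · rw [hne]
      simp [whileA, gval, fmax]
    · have hpos : (0 : Int) < ((remU st).length : Int) := by
        have := List.length_pos_of_ne_nil hne; exact_mod_cast this
      simp only [whileA, if_pos hpos]
      obtain ⟨h1, h2⟩ := remU_innerA st 0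
      set st' := (innerA st 0).1 with hst'
      have hsub : List.Sublist (remU st') (remU st) := h1 ▸ passP_fst_sublist (remU st) 0
      have hlt : (remU st').length < (remU st).length := by
        obtain ⟨x, rest, hx⟩ := List.exists_cons_of_ne_nil hne
        have h0x : (0 : Int) ≤ x := hn x (by rw [hx]; simp)
        have : (passP (remU st) 0).1 = (passP rest 1).1 := by
          rw [hx]; simp [passP, h0x]
        have hle : (passP rest 1).1.length ≤ rest.length :=
          (passP_fst_sublist rest 1).length_le
        rw [h1, this, hx]
        simp only [List.length_cons]
        omega
      have htot : ((remU st).length : Int) - (innerA st 0).2 = ((remU st').length : Int) := by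
        have hsnd := passP_snd (remU st) 0
        rw [h2, h1]
        omega
      rw [htot]
      rw [ih st' (ans + 1) (hpw.sublist hsub) (fun x hx => hn x (hsub.mem hx)) (by omega)]
      have hgp : gval (remU st') = gval (remU st) - 1 := by
        rw [h1]; exact gval_pass hpw hn hne
      rw [hgp]
      ring

-- ---- index form (port B) = value form ----
theorem idx_le_cntLe {xs : List Int} (hpw : xs.Pairwise (· ≤ ·)) :
    ∀ (i : Nat) (hi : i < xs.length), ((i : Int) + 1) ≤ cntLe (xs[i]) xs := by
  induction xs with
  | nil => intro i hi; simp at hi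
  | cons x xs ih =>
    intro i hi
    have hhd : ∀ z ∈ xs, x ≤ z := fun z hz => List.rel_of_pairwise_cons hpw hz
    cases i with
    | zero =>
      have : (1 : Int) ≤ cntLe x (x :: xs) := cntLe_pos_of_mem (by simp)
      simpa using this
    | succ j =>
      have hj : j < xs.length := by simpa using hi
      have := ih hpw.of_cons j hj
      have hxv : x ≤ xs[j] := hhd _ (xs.getElem_mem hj)
      have : cntLe (xs[j]) (x :: xs) = 1 + cntLe (xs[j]) xs := by
        rw [cntLe_cons]; simp [hxv]
      simp only [List.getElem_cons_succ]
      rw [this]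
      push_cast
      omega

theorem exists_last_le {xs : List Int} (hpw : xs.Pairwise (· ≤ ·)) {v : Int}
    (h1 : 1 ≤ cntLe v xs) :
    ∃ (i : Nat) (hi : i < xs.length), xs[i] ≤ v ∧ cntLe v xs = (i : Int) + 1 := by
  induction xs with
  | nil => simp [cntLe_nil] at h1
  | cons x xs ih =>
    have hhd : ∀ z ∈ xs, x ≤ z := fun z hz => List.rel_of_pairwise_cons hpw hz
    by_cases hxv : x ≤ v
    · by_cases hrest : 1 ≤ cntLe v xs
      · obtain ⟨i, hi, hle, hc⟩ := ih hpw.of_cons hrest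
        refine ⟨i + 1, by simpa using Nat.succ_lt_succ hi, by simpa using hle, ?_⟩
        have hone : (if x ≤ v then (1 : Int) else 0) = 1 := by simp [hxv]
        rw [cntLe_cons, hc, hone]
        push_cast
        ring
      · refine ⟨0, by simp, by simpa using hxv, ?_⟩
        have h0 := cntLe_nonneg v xs
        have hone : (if x ≤ v then (1 : Int) else 0) = 1 := by simp [hxv]
        rw [cntLe_cons, hone]
        omega
    · exfalso
      have : xs.filter (fun z => decide (z ≤ v)) = [] := by
        rw [List.filter_eq_nil_iff]
        intro z hz
        have := hhd z hz
        simp only [decide_eq_true_eq]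
        omega
      rw [cntLe_cons] at h1
      simp only [hxv, if_neg, not_false_iff] at h1
      simp [cntLe, this] at h1

set_option maxHeartbeats 1000000 in
theorem gidx_eq_gval {xs : List Int} (hpw : xs.Pairwise (· ≤ ·)) (hn : ∀ x ∈ xs, 0 ≤ x) :
    fmax (fun iv => cq (iv.1 + 1) (iv.2 + 1)) (PySem.List.enumerate xs 0) 0 = gval xs := by
  apply le_antisymm
  · refine fmax_le _ _ _ _ ?_ (gval_nonneg xs)
    intro iv hiv
    obtain ⟨k, hk, hivk⟩ := (PySem.List.mem_enumerate_iff _ _ _).mp hiv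
    subst hivk
    have hv : xs[k] ∈ xs := xs.getElem_mem hk
    have h0v : 0 ≤ xs[k] := hn _ hv
    show cq ((0 : Int) + (k : Int) + 1) (xs[k] + 1) ≤ gval xs
    have hidx : (0 : Int) + (k : Int) + 1 ≤ cntLe (xs[k]) xs := by
      have := idx_le_cntLe hpw k hk
      omega
    calc cq ((0 : Int) + (k : Int) + 1) (xs[k] + 1)
        ≤ cq (cntLe (xs[k]) xs) (xs[k] + 1) := cq_mono_a _ _ _ hidx (by omega)
      _ ≤ gval xs := le_fmax_of_mem (fun u => cq (cntLe u xs) (u + 1)) xs 0 hv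
  · refine fmax_le _ _ _ _ ?_ (fmax_init_le _ _ _)
    intro v hv
    have h0v : 0 ≤ v := hn v hv
    obtain ⟨i, hi, hle, hc⟩ := exists_last_le hpw (cntLe_pos_of_mem hv)
    have hmem : ((0 : Int) + (i : Int), xs[i]) ∈ PySem.List.enumerate xs 0 :=
      (PySem.List.mem_enumerate_iff _ _ _).mpr ⟨i, hi, rfl⟩
    have h0i : 0 ≤ xs[i] := hn _ (xs.getElem_mem hi)
    calc cq (cntLe v xs) (v + 1)
        ≤ cq (cntLe v xs) (xs[i] + 1) :=
          cq_anti_b _ _ _ (cntLe_nonneg v xs) (by omega) (by omega)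
      _ = cq ((0 : Int) + (i : Int) + 1) (xs[i] + 1) := by rw [hc]; ring_nf
      _ ≤ _ := le_fmax_of_mem (fun iv => cq (iv.1 + 1) (iv.2 + 1)) (PySem.List.enumerate xs 0) 0 hmem

-- ===== VERDICT (by name: the statement is the Claim_ definition above) =====
theorem solution_spec : Claim_equal_solution := by
  intro box _ hpre
  unfold Spec_solution solution solution_alt
  set s := PySem.List.sorted box (fun x => x) false with hs
  have hpw : s.Pairwise (· ≤ ·) := by
    have := PySem.List.sorted_pairwise box (fun x => x) (κ := Int)
    simpa [hs] using this
  have hn : ∀ x ∈ s, 0 ≤ x := by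
    intro x hx
    exact hpre x ((PySem.List.mem_sorted _ _ _ _).mp hx)
  have hrem : remU (s.map (fun x => (x, false))) = s := remU_map_false s
  have hlen : ((s.length : Nat) : Int) = ((remU (s.map (fun x => (x, false)))).length : Int) := by
    rw [hrem]
  have := whileA_eq (s.length + 1) (s.map (fun x => (x, false))) 0
    (by rw [hrem]; exact hpw) (by rw [hrem]; exact hn) (by rw [hrem]; omega)
  rw [hrem] at this
  rw [this]
  have halt : (PySem.List.enumerate s 0).foldl
      (fun ans iv =>
        let q := -(PySem.Int.floordiv (-(iv.1 + 1)) (iv.2 + 1))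
        if q > ans then q else ans) 0
      = fmax (fun iv => cq (iv.1 + 1) (iv.2 + 1)) (PySem.List.enumerate s 0) 0 := rfl
  rw [halt, gidx_eq_gval hpw hn]
  ring
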